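-- pv_equiv track=rewrite | github.com/lachyts/giflab | src/giflab/pipeline_elimination.py | _find_pareto_optimal_points
-- ===== SOURCE A (Python) =====
-- def _find_pareto_optimal_points(points: list) -> list:
--     """Find Pareto optimal points from a list of (quality, size, ...) tuples.
--
--     Higher quality is better, lower size is better.
--     """
--     if not points:
--         return []
--
--     # Sort by quality (descending) then by size (ascending)
--     sorted_points = sorted(points, key=lambda x: (-x[0], x[1]))
--
--     pareto_frontier = []
--     min_size_seen = float('inf')
--
--     for point in sorted_points:
--         quality, size = point[0], point[1]
--
--         # This point is Pareto optimal if it has smaller size than any previous point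
--         # (since we're iterating in descending quality order)
--         if size < min_size_seen:
--             pareto_frontier.append(point)
--             min_size_seen = size
--
--     return pareto_frontier
-- ===== SOURCE B (Python) =====
-- def _find_pareto_optimal_points(points: list) -> list:
--     """Pareto frontier by recursive selection: sort as before, then repeatedly
--     take the best remaining point and discard every point whose size is not
--     strictly smaller, recursing on what survives."""
--     sorted_points = sorted(points, key=lambda x: (-x[0], x[1]))
--
--     def frontier(pts: list) -> list:
--         if not pts:
--             return []
--         head = pts[0]
--         return [head] + frontier([p for p in pts[1:] if p[1] < head[1]])
--
--     return frontier(sorted_points)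
-- ===== Notes on version B (the rewrite author's own statement) =====
-- stated objective: alternative
-- what changed: B replaces A's single-pass loop with a running minimum size by a recursive skyline selection: after the same sort, keep the head and recurse on the tail filtered to points of strictly smaller size.
import Mathlib
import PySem

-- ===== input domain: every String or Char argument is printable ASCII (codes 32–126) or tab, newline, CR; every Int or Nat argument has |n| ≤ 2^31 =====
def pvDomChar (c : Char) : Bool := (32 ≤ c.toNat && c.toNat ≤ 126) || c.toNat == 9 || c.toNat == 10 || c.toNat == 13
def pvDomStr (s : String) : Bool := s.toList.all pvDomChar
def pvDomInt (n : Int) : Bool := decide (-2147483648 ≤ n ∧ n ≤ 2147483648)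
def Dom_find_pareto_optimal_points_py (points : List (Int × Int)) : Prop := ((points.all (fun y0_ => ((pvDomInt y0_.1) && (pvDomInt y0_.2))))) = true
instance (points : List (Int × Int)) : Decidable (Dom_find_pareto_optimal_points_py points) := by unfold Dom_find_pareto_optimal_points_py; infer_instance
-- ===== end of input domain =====

-- B replaces A's running-minimum pass with a recursive skyline selection (take head, filter tail, recurse); same sort, same output.

-- ===== PORT A =====
-- A's loop body: min_size_seen starts as float('inf'), ported as Option Int with
-- none = inf (sizes are Ints, so 'size < inf' is always true; exact on Int inputs).
def pvStepA (st : List (Int × Int) × Option Int) (p : Int × Int) : List (Int × Int) × Option Int :=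
  match st.2 with
  | none => (st.1 ++ [p], some p.2)
  | some m => if p.2 < m then (st.1 ++ [p], some p.2) else st

def find_pareto_optimal_points_py (points : List (Int × Int)) : List (Int × Int) :=
  if points = [] then []
  else
    let sorted_points := PySem.List.sorted2 points (fun x => -x.1) (fun x => x.2)
    (sorted_points.foldl pvStepA ([], none)).1

-- ===== PORT B =====
-- B's recursive helper: keep the head, recurse on the tail filtered to strictly smaller sizes.
def pvFrontier : List (Int × Int) → List (Int × Int)
  | [] => []
  | h :: t => h :: pvFrontier (t.filter (fun p => decide (p.2 < h.2)))
termination_by l => l.length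
decreasing_by
  have := List.length_filter_le (fun p : {x // x ∈ t} => decide ((↑p : Int × Int).2 < h.2)) t.attach
  simp at this ⊢; omega

def find_pareto_optimal_points_py_alt (points : List (Int × Int)) : List (Int × Int) :=
  pvFrontier (PySem.List.sorted2 points (fun x => -x.1) (fun x => x.2))

-- ===== PRECONDITION & SPEC =====
def Spec_find_pareto_optimal_points_py (points : List (Int × Int)) (out : List (Int × Int)) : Prop := out = find_pareto_optimal_points_py_alt points
instance (points : List (Int × Int)) (out : List (Int × Int)) : Decidable (Spec_find_pareto_optimal_points_py points out) := by unfold Spec_find_pareto_optimal_points_py; infer_instance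

-- ===== CLAIM (what is proved, stated in full; the proofs are below) =====
def Claim_equal_find_pareto_optimal_points_py : Prop := ∀ (points : List (Int × Int)), Dom_find_pareto_optimal_points_py points → Spec_find_pareto_optimal_points_py points (find_pareto_optimal_points_py points)

-- ===== LEMMAS AND PROOFS =====

theorem pvFrontier_nil : pvFrontier [] = [] := by rw [pvFrontier]

theorem pvFrontier_cons (h : Int × Int) (t : List (Int × Int)) :
    pvFrontier (h :: t) = h :: pvFrontier (t.filter (fun p => decide (p.2 < h.2))) := by
  rw [pvFrontier]

-- The current minimum m acts as a filter on the remaining list: A's fold from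
-- (out, m) produces out ++ the skyline of the m-filtered rest.
def pvMCond (m : Option Int) (p : Int × Int) : Bool :=
  match m with | none => true | some v => decide (p.2 < v)

theorem pv_fold_eq (l : List (Int × Int)) : ∀ (out : List (Int × Int)) (m : Option Int),
    (l.foldl pvStepA (out, m)).1 = out ++ pvFrontier (l.filter (pvMCond m)) := by
  induction l with
  | nil => intro out m; simp [pvFrontier_nil]
  | cons p l ih =>
    intro out m
    by_cases hp : pvMCond m p = true
    · have hAstep : pvStepA (out, m) p = (out ++ [p], some p.2) := by
        cases m with
        | none => rfl
        | some v =>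
          have : p.2 < v := of_decide_eq_true hp
          simp only [pvStepA]; rw [if_pos this]
      have hfilter : (l.filter (pvMCond m)).filter (fun q => decide (q.2 < p.2))
          = l.filter (pvMCond (some p.2)) := by
        rw [List.filter_filter]
        apply List.filter_congr
        intro q _
        cases m with
        | none => simp [pvMCond]
        | some v =>
          have hpv : p.2 < v := of_decide_eq_true hp
          simp only [pvMCond]
          by_cases hq : q.2 < p.2
          · simp [hq, lt_trans hq hpv]
          · simp [hq]
      rw [List.foldl_cons, hAstep, ih, List.filter_cons_of_pos hp, pvFrontier_cons, hfilter]
      simp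
    · have hAstep : pvStepA (out, m) p = (out, m) := by
        cases m with
        | none => simp [pvMCond] at hp
        | some v =>
          have : ¬ p.2 < v := by
            simpa [pvMCond] using hp
          simp only [pvStepA]; rw [if_neg this]
      rw [List.foldl_cons, hAstep, ih, List.filter_cons_of_neg (by simpa using hp)]

-- ===== VERDICT (by name: the statement is the Claim_ definition above) =====
theorem find_pareto_optimal_points_py_spec : Claim_equal_find_pareto_optimal_points_py := by
  intro points _
  unfold Spec_find_pareto_optimal_points_py find_pareto_optimal_points_py find_pareto_optimal_points_py_alt
  by_cases h : points = []
  · simp [h, PySem.List.sorted2, pvFrontier_nil]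
  · simp only [if_neg h]
    rw [pv_fold_eq]
    simp only [show pvMCond none = fun _ => true from rfl, List.filter_true, List.nil_append]
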